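-- pv_equiv track=rewrite | github.com/roa9618/algorithm-practice | 프로그래머스/0/181887. 홀수 vs 짝수/홀수 vs 짝수.py | solution
-- ===== SOURCE A (Python) =====
-- def solution(num_list):
--     even = 0
--     odd = 0
--
--     for i in range(1, len(num_list) + 1) :
--         if i % 2 != 0 :
--             odd += num_list[i - 1]
--         else :
--             even += num_list[i - 1]
--
--     if odd >= even :
--         answer = odd
--     else :
--         answer = even
--
--     return answer
-- ===== SOURCE B (Python) =====
-- def solution(num_list):
--     odd = sum(num_list[::2])
--     even = sum(num_list[1::2])
--     return max(odd, even)
-- ===== Notes on version B (the rewrite author's own statement) =====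
-- stated objective: idiomatic
-- what changed: Replaces the 1-based index loop with its parity branch by two strided slices num_list[::2] and num_list[1::2], summed and combined with max (odd first, matching the odd >= even tie rule).
import Mathlib
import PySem

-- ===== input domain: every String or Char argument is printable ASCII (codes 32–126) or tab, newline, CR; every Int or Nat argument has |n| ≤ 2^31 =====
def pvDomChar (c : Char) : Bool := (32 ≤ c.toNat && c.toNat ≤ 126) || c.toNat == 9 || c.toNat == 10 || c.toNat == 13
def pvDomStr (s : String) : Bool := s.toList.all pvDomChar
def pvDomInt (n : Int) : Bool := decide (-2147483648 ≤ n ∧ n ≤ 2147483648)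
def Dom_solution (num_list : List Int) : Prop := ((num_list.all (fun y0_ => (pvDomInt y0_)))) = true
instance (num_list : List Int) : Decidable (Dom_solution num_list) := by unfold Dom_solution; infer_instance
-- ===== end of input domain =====

-- B replaces the 1-based index loop with its parity branch by two strided slices
-- num_list[::2] / num_list[1::2], summed and combined with max (idiomatic; same cost).

-- ===== PORT A =====
def solution (num_list : List Int) : Int :=
  let st := (PySem.List.pyRange 1 ((num_list.length : Int) + 1)).foldl
    (fun (st : Int × Int) i =>
      if PySem.Int.mod i 2 ≠ 0 then (st.1, st.2 + PySem.List.pyGetD num_list (i - 1) 0)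
      else (st.1 + PySem.List.pyGetD num_list (i - 1) 0, st.2))
    ((0 : Int), (0 : Int))   -- st = (even, odd)
  if st.2 ≥ st.1 then st.2 else st.1

-- ===== PORT B =====
def solution_alt (num_list : List Int) : Int :=
  let odd := ((PySem.List.slice? num_list none none 2).getD []).sum
  let even := ((PySem.List.slice? num_list (some 1) none 2).getD []).sum
  max odd even

-- ===== PRECONDITION & SPEC =====
def Spec_solution (num_list : List Int) (out : Int) : Prop := out = solution_alt num_list
instance (num_list : List Int) (out : Int) : Decidable (Spec_solution num_list out) := by unfold Spec_solution; infer_instance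

-- ===== CLAIM (what is proved, stated in full; the proofs are below) =====
def Claim_equal_solution : Prop := ∀ (num_list : List Int), Dom_solution num_list → Spec_solution num_list (solution num_list)

-- ===== LEMMAS AND PROOFS =====

-- every-other-element of a list, starting at index 0
def pvEvens : List Int → List Int
  | [] => []
  | [x] => [x]
  | x :: _ :: r => x :: pvEvens r

lemma pvEvens_cons_tail (y : Int) (r : List Int) : pvEvens (y :: r) = y :: pvEvens r.tail := by
  cases r <;> rfl

lemma pvF (xs : List Int) :
    (List.range ((xs.length + 1)/2)).filterMap (fun k => xs[2*k]?) = pvEvens xs := by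
  induction xs using pvEvens.induct with
  | case1 => simp [pvEvens]
  | case2 x => simp [pvEvens]
  | case3 x y r ih =>
    rw [pvEvens, ← ih]
    have h2 : ((x :: y :: r).length + 1)/2 = (r.length + 1)/2 + 1 := by simp; omega
    rw [h2, List.range_succ_eq_map]
    simp only [List.filterMap_cons, List.filterMap_map, Function.comp]
    have hx : (x :: y :: r)[2*0]? = some x := by simp
    rw [hx]
    show x :: _ = x :: _
    congr 1

lemma pvS1 (xs : List Int) : PySem.List.slice? xs none none 2 = some (pvEvens xs) := by
  simp only [PySem.List.slice?, PySem.List.sliceIndices]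
  norm_num
  have hc : (if 0 < xs.length then (((xs.length:Int) + 2 - 1) / 2).toNat else 0) = (xs.length + 1)/2 := by
    split <;> omega
  have hf : ∀ k : Nat, (2*(k:Int)).toNat = 2*k := by omega
  rw [hc]
  simp only [hf]
  exact pvF xs

lemma pvS2 (xs : List Int) : PySem.List.slice? xs (some 1) none 2 = some (pvEvens xs.tail) := by
  simp only [PySem.List.slice?, PySem.List.sliceIndices]
  norm_num
  cases xs with
  | nil => simp [pvEvens]
  | cons x t =>
    have hc : (if 1 < (x::t).length then ((((x::t).length:Int) - min 1 ((x::t).length:Int) + 2 - 1) / 2).toNat else 0)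
        = (t.length + 1)/2 := by
      simp only [List.length_cons]
      split <;> push_cast <;> omega
    rw [hc]
    have hf : ∀ k : Nat, (x::t)[(min 1 (((x::t).length:Int)) + 2*(k:Int)).toNat]? = t[2*k]? := by
      intro k
      have h1 : (min 1 (((x::t).length:Int)) + 2*(k:Int)).toNat = 2*k+1 := by
        simp only [List.length_cons]; push_cast; omega
      rw [h1]
      exact List.getElem?_cons_succ
    simp only [hf]
    exact pvF t

lemma pvShift (x y : Int) (r : List Int) (j : Int) (hj : 0 ≤ j) :
    PySem.List.pyGetD (x :: y :: r) (j + 2) 0 = PySem.List.pyGetD r j 0 := by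
  lift j to ℕ using hj
  have h : (j : Int) + 2 = ((j + 2 : ℕ) : Int) := by push_cast; ring
  rw [h, PySem.List.pyGetD_natCast, PySem.List.pyGetD_natCast]
  simp [List.getD]

lemma pvLoopA (xs : List Int) : ∀ (a e o : Int), 0 ≤ a → a % 2 = 1 →
    (PySem.List.pyRange a (a + xs.length)).foldl
      (fun (st : Int × Int) i =>
        if PySem.Int.mod i 2 ≠ 0 then (st.1, st.2 + PySem.List.pyGetD xs (i - a) 0)
        else (st.1 + PySem.List.pyGetD xs (i - a) 0, st.2)) (e, o)
    = (e + (pvEvens xs.tail).sum, o + (pvEvens xs).sum) := by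
  induction xs using pvEvens.induct with
  | case1 =>
    intro a e o _ _
    rw [show a + ([] : List Int).length = a by simp, PySem.List.pyRange_one_eq_nil le_rfl]
    simp [pvEvens]
  | case2 x =>
    intro a e o ha hpar
    have hlen : a + ([x] : List Int).length = a + 1 := by simp
    rw [hlen, PySem.List.pyRange_one_cons (by omega), PySem.List.pyRange_one_eq_nil le_rfl]
    have hm : PySem.Int.mod a 2 = 1 := by rw [PySem.Int.mod_eq_emod_of_pos (by omega)]; omega
    simp only [List.foldl_cons, List.foldl_nil, hm]
    norm_num
    simp [pvEvens]
  | case3 x y r ih =>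
    intro a e o ha hpar
    have hlen : a + ((x :: y :: r) : List Int).length = (a + 2) + r.length := by simp; omega
    rw [hlen, PySem.List.pyRange_one_cons (by omega), PySem.List.pyRange_one_cons (by omega)]
    simp only [List.foldl_cons]
    have hm1 : PySem.Int.mod a 2 = 1 := by rw [PySem.Int.mod_eq_emod_of_pos (by omega)]; omega
    have hm2 : PySem.Int.mod (a + 1) 2 = 0 := by rw [PySem.Int.mod_eq_emod_of_pos (by omega)]; omega
    rw [show a + 1 + 1 = a + 2 by ring]
    have hg0 : PySem.List.pyGetD (x :: y :: r) (a - a) 0 = x := by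
      rw [show a - a = (0:Int) by ring, PySem.List.pyGetD_zero_cons]
    have hg1 : PySem.List.pyGetD (x :: y :: r) (a + 1 - a) 0 = y := by
      rw [show a + 1 - a = ((1:ℕ):Int) by push_cast; ring, PySem.List.pyGetD_natCast]
      rfl
    simp only [hm1, hm2, hg0, hg1]
    norm_num
    have hcongr : (PySem.List.pyRange (a + 2) (a + 2 + r.length)).foldl
        (fun (st : Int × Int) i =>
          if PySem.Int.mod i 2 ≠ 0 then (st.1, st.2 + PySem.List.pyGetD (x :: y :: r) (i - a) 0)
          else (st.1 + PySem.List.pyGetD (x :: y :: r) (i - a) 0, st.2)) (e + y, o + x)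
        = (PySem.List.pyRange (a + 2) (a + 2 + r.length)).foldl
        (fun (st : Int × Int) i =>
          if PySem.Int.mod i 2 ≠ 0 then (st.1, st.2 + PySem.List.pyGetD r (i - (a + 2)) 0)
          else (st.1 + PySem.List.pyGetD r (i - (a + 2)) 0, st.2)) (e + y, o + x) := by
      apply PySem.List.foldl_congr_mem
      intro acc i hi
      rw [PySem.List.mem_pyRange_one] at hi
      have hsh : PySem.List.pyGetD (x :: y :: r) (i - a) 0 = PySem.List.pyGetD r (i - (a + 2)) 0 := by
        rw [show i - a = (i - (a + 2)) + 2 by ring]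
        exact pvShift x y r _ (by omega)
      rw [hsh]
    have hih := ih (a + 2) (e + y) (o + x) (by omega) (by omega)
    norm_num at hcongr hih
    rw [hcongr, hih]
    simp only [pvEvens, pvEvens_cons_tail, List.sum_cons, Prod.mk.injEq]
    constructor <;> ring

lemma pvMaxEq (o e : Int) : (if o ≥ e then o else e) = max o e := by
  rw [max_def]; split_ifs <;> omega

-- ===== VERDICT (by name: the statement is the Claim_ definition above) =====
theorem solution_spec : Claim_equal_solution := by
  intro xs _
  unfold Spec_solution solution solution_alt
  rw [pvS1, pvS2]
  simp only [Option.getD_some]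
  have h := pvLoopA xs 1 0 0 (by omega) (by omega)
  rw [show (1:Int) + xs.length = (xs.length:Int) + 1 by ring] at h
  rw [h]
  simp only [zero_add]
  exact pvMaxEq _ _
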